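-- pv_equiv track=rewrite | github.com/qeedquan/challenges | codegolf/a-yet-unlisted-sequence.py | gen
-- ===== SOURCE A (Python) =====
-- def gen(n):
--     r = []
--     c = set({2, 3})
--     s = set({})
--     while len(r) < n:
--         x = min(c - s)
--         s |= {x}
--         r.append(x)
--         for y in s:
--             c |= {x*y + 1}
--     return r
-- ===== SOURCE B (Python) =====
-- def _merge(a, b):
--     # merge two strictly increasing lists into one, dropping duplicates
--     out = []
--     i = j = 0
--     la, lb = len(a), len(b)
--     while i < la and j < lb:
--         if a[i] < b[j]:
--             out.append(a[i]); i += 1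
--         elif b[j] < a[i]:
--             out.append(b[j]); j += 1
--         else:
--             out.append(a[i]); i += 1; j += 1
--     out.extend(a[i:])
--     out.extend(b[j:])
--     return out
--
--
-- def gen(n):
--     r = []
--     pending = [2, 3]  # sorted, distinct, all strictly greater than every chosen term
--     while len(r) < n:
--         x = pending[0]
--         r.append(x)
--         # new candidates x*y+1 for y in the chosen terms (incl. x); ascending since r is.
--         # only the first n-len(r) candidates can still be picked, so truncate.
--         pending = _merge(pending[1:], [x * y + 1 for y in r])[:n - len(r)]
--     return r
-- ===== Notes on version B (the rewrite author's own statement) =====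
-- stated objective: faster
-- what changed: A keeps an ever-growing candidate set and a seen set and recomputes the minimum unseen candidate by a full scan every step; B keeps one sorted list of unseen candidates, pops its head, merges in the already-sorted list of new candidates, and truncates the list to the candidates that can still be picked before the run ends, so each step costs linear time.
import Mathlib
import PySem

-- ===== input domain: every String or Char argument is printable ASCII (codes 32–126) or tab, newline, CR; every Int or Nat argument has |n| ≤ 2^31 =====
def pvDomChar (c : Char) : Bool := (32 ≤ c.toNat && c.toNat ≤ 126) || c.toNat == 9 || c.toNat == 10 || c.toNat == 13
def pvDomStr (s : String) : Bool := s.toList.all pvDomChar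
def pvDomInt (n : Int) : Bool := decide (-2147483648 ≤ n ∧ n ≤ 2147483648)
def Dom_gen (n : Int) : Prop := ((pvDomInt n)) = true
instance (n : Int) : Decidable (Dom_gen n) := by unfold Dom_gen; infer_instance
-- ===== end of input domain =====

-- B replaces A's min over a growing candidate SET by a sorted pending LIST: each step pops the
-- head, merges in the (already sorted) new candidates and truncates to the terms still pickable.

-- ===== PORT A =====
-- for y in s: c |= {x*y+1}  (the resulting set does not depend on the iteration order over s)
def genInner (x : Int) (s : PySem.Set Int) (c : PySem.Set Int) : PySem.Set Int :=
  s.foldl (fun c y => PySem.Set.add c (x * y + 1)) c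

def genLoop : Nat → List Int → PySem.Set Int → PySem.Set Int → List Int
  | 0, r, _, _ => r
  | fuel + 1, r, c, s =>
    match PySem.List.min? (PySem.Set.diff c s) (fun y => y) with
    | none => r   -- unreachable: c - s is never empty (Python's min would raise there)
    | some x =>
      let s' := PySem.Set.add s x
      let r' := r ++ [x]
      genLoop fuel r' (genInner x s' c) s'

def gen (n : Int) : List Int :=
  genLoop n.toNat [] (PySem.Set.ofList [2, 3]) PySem.Set.empty

-- ===== PORT B =====
-- _merge: merge two strictly increasing lists, dropping duplicates
def mergeB : List Int → List Int → List Int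
  | [], b => b
  | a, [] => a
  | x :: a, y :: b =>
    if x < y then x :: mergeB a (y :: b)
    else if y < x then y :: mergeB (x :: a) b
    else x :: mergeB a b

def genAltLoop : Nat → List Int → List Int → List Int
  | 0, r, _ => r
  | fuel + 1, r, pending =>
    match pending with
    | [] => r   -- unreachable: pending stays nonempty while terms remain (pending[0] would raise)
    | x :: rest =>
      let r' := r ++ [x]
      genAltLoop fuel r' ((mergeB rest (r'.map (fun y => x * y + 1))).take fuel)

def gen_alt (n : Int) : List Int := genAltLoop n.toNat [] [2, 3]

-- ===== PRECONDITION & SPEC =====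
def Spec_gen (n : Int) (out : List Int) : Prop := out = gen_alt n
instance (n : Int) (out : List Int) : Decidable (Spec_gen n out) := by unfold Spec_gen; infer_instance

-- ===== CLAIM (what is proved, stated in full; the proofs are below) =====
def Claim_equal_gen : Prop := ∀ (n : Int), Dom_gen n → Spec_gen n (gen n)

-- ===== LEMMAS AND PROOFS =====

-- reference loop both ports are reduced to: r = output so far, full = the UNTRUNCATED
-- strictly sorted list of unseen candidates
def canonLoop : Nat → List Int → List Int → List Int
  | 0, r, _ => r
  | fuel + 1, r, full =>
    match full with
    | [] => r
    | x :: rest =>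
      canonLoop fuel (r ++ [x]) (mergeB rest ((r ++ [x]).map (fun y => x * y + 1)))

theorem mem_mergeB (a b : List Int) (z : Int) : z ∈ mergeB a b ↔ z ∈ a ∨ z ∈ b := by
  fun_induction mergeB a b with
  | case1 b => simp
  | case2 a h => simp
  | case3 x a y b hlt ih => simp [ih]; tauto
  | case4 x a y b hlt hgt ih => simp [ih]; tauto
  | case5 x a y b hlt hgt ih =>
      have hxy : x = y := le_antisymm (not_lt.1 hgt) (not_lt.1 hlt)
      subst hxy
      simp [ih]; tauto

theorem pairwise_mergeB (a b : List Int) (ha : a.Pairwise (· < ·)) (hb : b.Pairwise (· < ·)) :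
    (mergeB a b).Pairwise (· < ·) := by
  fun_induction mergeB a b with
  | case1 b => exact hb
  | case2 a h => exact ha
  | case3 x a y b hlt ih =>
      rw [List.pairwise_cons] at ha ⊢
      refine ⟨?_, ih ha.2 hb⟩
      intro z hz
      rcases (mem_mergeB _ _ _).1 hz with h1 | h1
      · exact ha.1 z h1
      · rcases List.mem_cons.1 h1 with rfl | h2
        · exact hlt
        · exact lt_trans hlt ((List.pairwise_cons.1 hb).1 z h2)
  | case4 x a y b hlt hgt ih =>
      rw [List.pairwise_cons] at hb ⊢
      refine ⟨?_, ih ha hb.2⟩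
      intro z hz
      rcases (mem_mergeB _ _ _).1 hz with h1 | h1
      · rcases List.mem_cons.1 h1 with rfl | h2
        · exact hgt
        · exact lt_trans hgt ((List.pairwise_cons.1 ha).1 z h2)
      · exact hb.1 z h1
  | case5 x a y b hlt hgt ih =>
      have hxy : x = y := le_antisymm (not_lt.1 hgt) (not_lt.1 hlt)
      subst hxy
      rw [List.pairwise_cons] at ha hb ⊢
      refine ⟨?_, ih ha.2 hb.2⟩
      intro z hz
      rcases (mem_mergeB _ _ _).1 hz with h1 | h1
      · exact ha.1 z h1
      · exact hb.1 z h1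

-- the first k elements of a merge depend only on the first k elements of each input
theorem take_mergeB_congr (k : Nat) (a a' b b' : List Int)
    (hA : a.take k = a'.take k) (hB : b.take k = b'.take k) :
    (mergeB a b).take k = (mergeB a' b').take k := by
  induction k generalizing a a' b b' with
  | zero => simp
  | succ k ih =>
    cases a with
    | nil =>
      cases a' with
      | nil => simpa [mergeB] using hB
      | cons x' a2' => simp at hA
    | cons x a2 =>
      cases a' with
      | nil => simp at hA
      | cons x' a2' =>
        simp [List.take_succ_cons] at hA
        obtain ⟨rfl, hA2⟩ := hA
        cases b with
        | nil =>
          cases b' with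
          | nil => simp [mergeB, List.take_succ_cons, hA2]
          | cons y' b2' => simp at hB
        | cons y b2 =>
          cases b' with
          | nil => simp at hB
          | cons y' b2' =>
            simp [List.take_succ_cons] at hB
            obtain ⟨rfl, hB2⟩ := hB
            by_cases h1 : x < y
            · simp only [mergeB, if_pos h1, List.take_succ_cons]
              have : (y :: b2).take k = (y :: b2').take k := by
                cases k with
                | zero => simp
                | succ m =>
                    have := congrArg (List.take m) hB2
                    simpa [List.take_succ_cons, List.take_take] using this
              rw [ih a2 a2' _ _ hA2 this]
            · by_cases h2 : y < x
              · simp only [mergeB, if_neg h1, if_pos h2, List.take_succ_cons]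
                have : (x :: a2).take k = (x :: a2').take k := by
                  cases k with
                  | zero => simp
                  | succ m =>
                      have := congrArg (List.take m) hA2
                      simpa [List.take_succ_cons, List.take_take] using this
                rw [ih _ _ b2 b2' this hB2]
              · simp only [mergeB, if_neg h1, if_neg h2, List.take_succ_cons]
                rw [ih a2 a2' b2 b2' hA2 hB2]

theorem mem_genInner (x : Int) (l c : List Int) (z : Int) :
    z ∈ genInner x l c ↔ z ∈ c ∨ ∃ y ∈ l, z = x * y + 1 := by
  induction l generalizing c with
  | nil => simp [genInner]
  | cons y t ih =>
    simp only [genInner, List.foldl_cons] at *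
    rw [ih]
    simp [PySem.Set.mem_add]
    tauto

-- min? of any list with the same members as a strictly sorted x :: rest is x
theorem min?_eq_head (L : List Int) (x : Int) (rest : List Int)
    (hmem : ∀ z, z ∈ L ↔ z ∈ x :: rest)
    (hsort : (x :: rest).Pairwise (· < ·)) :
    PySem.List.min? L (fun y => y) = some x := by
  have hxL : x ∈ L := (hmem x).2 (by simp)
  cases hm : PySem.List.min? L (fun y => y) with
  | none =>
    rw [PySem.List.min?_eq_none_iff] at hm
    subst hm; simp at hxL
  | some m =>
    have hmL : m ∈ L := PySem.List.min?_mem hm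
    have h1 : m ≤ x := PySem.List.min?_isMin hm x hxL
    have h2 : x ≤ m := by
      rcases List.mem_cons.1 ((hmem m).1 hmL) with rfl | h
      · exact le_refl _
      · exact le_of_lt ((List.pairwise_cons.1 hsort).1 m h)
    rw [le_antisymm h1 h2]

-- the A-side loop invariant tying (r, c, s) to the sorted candidate list full
def InvA (r : List Int) (c s : PySem.Set Int) (full : List Int) : Prop :=
  (∀ z, z ∈ PySem.Set.diff c s ↔ z ∈ full) ∧
  full.Pairwise (· < ·) ∧
  (∀ z ∈ full, 2 ≤ z) ∧
  (∀ y ∈ r, 2 ≤ y) ∧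
  (∀ y ∈ r, ∀ z ∈ full, y < z) ∧
  (∀ y, y ∈ s ↔ y ∈ r) ∧
  r.Pairwise (· < ·)

theorem genLoop_eq_canon (fuel : Nat) (r : List Int) (c s : PySem.Set Int) (full : List Int)
    (h : InvA r c s full) (hne : full ≠ []) :
    genLoop fuel r c s = canonLoop fuel r full := by
  induction fuel generalizing r c s full with
  | zero => rfl
  | succ fuel ih =>
    obtain ⟨h1, h2, h3, h4, h5, h6, h7⟩ := h
    cases full with
    | nil => exact absurd rfl hne
    | cons x rest =>
      have hmin := min?_eq_head _ x rest h1 h2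
      simp only [genLoop, canonLoop, hmin]
      have hx2 : (2 : Int) ≤ x := h3 x (by simp)
      have hrestgt : ∀ z ∈ rest, x < z := (List.pairwise_cons.1 h2).1
      have hrlt : ∀ y ∈ r, y < x := fun y hy => h5 y hy x (by simp)
      have hnewsgt : ∀ z ∈ (r ++ [x]).map (fun y => x * y + 1), x < z := by
        intro z hz
        rcases List.mem_map.1 hz with ⟨y, hy, rfl⟩
        have hy2 : (2 : Int) ≤ y := by
          rcases List.mem_append.1 hy with hy | hy
          · exact h4 y hy
          · simp at hy; omega
        nlinarith
      have hmemC' : ∀ z, z ∈ genInner x (PySem.Set.add s x) c ↔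
          z ∈ c ∨ z ∈ (r ++ [x]).map (fun y => x * y + 1) := by
        intro z
        rw [mem_genInner]
        constructor
        · rintro (hz | ⟨y, hy, rfl⟩)
          · exact Or.inl hz
          · refine Or.inr (List.mem_map.2 ⟨y, ?_, rfl⟩)
            rcases (PySem.Set.mem_add _ _ _).1 hy with hy | rfl
            · exact List.mem_append.2 (Or.inl ((h6 y).1 hy))
            · simp
        · rintro (hz | hz)
          · exact Or.inl hz
          · rcases List.mem_map.1 hz with ⟨y, hy, rfl⟩
            refine Or.inr ⟨y, ?_, rfl⟩
            rw [PySem.Set.mem_add, h6]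
            rcases List.mem_append.1 hy with hy | hy
            · exact Or.inl hy
            · simp at hy; exact Or.inr hy
      have hmemS' : ∀ z, z ∈ PySem.Set.add s x ↔ z ∈ r ++ [x] := by
        intro z; rw [PySem.Set.mem_add, h6]; simp
      have hr'pw : (r ++ [x]).Pairwise (· < ·) := by
        rw [List.pairwise_append]
        exact ⟨h7, List.pairwise_singleton _ _,
          fun y hy z hz => by simp at hz; subst hz; exact hrlt y hy⟩
      apply ih
      · refine ⟨?_, ?_, ?_, ?_, ?_, hmemS', hr'pw⟩
        · intro z
          rw [PySem.Set.mem_diff, hmemC', hmemS', mem_mergeB]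
          constructor
          · rintro ⟨hz | hz, hns⟩
            · have hzd : z ∈ PySem.Set.diff c s := by
                rw [PySem.Set.mem_diff]
                refine ⟨hz, fun hzs => hns ?_⟩
                exact List.mem_append.2 (Or.inl ((h6 z).1 hzs))
              have := (h1 z).1 hzd
              rcases List.mem_cons.1 this with rfl | hzr
              · exact absurd (by simp) hns
              · exact Or.inl hzr
            · exact Or.inr hz
          · rintro (hz | hz)
            · have hzf : z ∈ x :: rest := by simp [hz]
              have hzd := (h1 z).2 hzf
              rw [PySem.Set.mem_diff] at hzd
              refine ⟨Or.inl hzd.1, fun hzr => ?_⟩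
              rcases List.mem_append.1 hzr with hzr | hzr
              · exact absurd ((h6 z).2 hzr) hzd.2
              · simp at hzr; have := hrestgt z hz; omega
            · refine ⟨Or.inr hz, fun hzr => ?_⟩
              have hxz := hnewsgt z hz
              rcases List.mem_append.1 hzr with hzr | hzr
              · exact absurd hxz (not_lt.2 (le_of_lt (hrlt z hzr)))
              · simp at hzr; omega
        · refine pairwise_mergeB _ _ ((List.pairwise_cons.1 h2).2) ?_
          refine List.Pairwise.map _ ?_ hr'pw
          intro a b hab; nlinarith
        · intro z hz
          rcases (mem_mergeB _ _ _).1 hz with hz | hz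
          · exact h3 z (by simp [hz])
          · have := hnewsgt z hz; omega
        · intro y hy
          rcases List.mem_append.1 hy with hy | hy
          · exact h4 y hy
          · simp at hy; omega
        · intro y hy z hz
          rcases (mem_mergeB _ _ _).1 hz with hz | hz
          · rcases List.mem_append.1 hy with hy | hy
            · exact lt_trans (hrlt y hy) (hrestgt z hz)
            · simp at hy; have := hrestgt z hz; omega
          · have hxz := hnewsgt z hz
            rcases List.mem_append.1 hy with hy | hy
            · exact lt_trans (hrlt y hy) hxz
            · simp at hy; omega
      · have : x * x + 1 ∈ mergeB rest ((r ++ [x]).map (fun y => x * y + 1)) := by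
          rw [mem_mergeB]
          exact Or.inr (List.mem_map.2 ⟨x, by simp, rfl⟩)
        exact List.ne_nil_of_mem this

theorem genAltLoop_eq_canon (fuel : Nat) (r pending full : List Int)
    (h : pending.take fuel = full.take fuel) :
    genAltLoop fuel r pending = canonLoop fuel r full := by
  induction fuel generalizing r pending full with
  | zero => rfl
  | succ fuel ih =>
    cases pending with
    | nil =>
      cases full with
      | nil => rfl
      | cons x' rest' => simp at h
    | cons x rest =>
      cases full with
      | nil => simp at h
      | cons x' rest' =>
        simp [List.take_succ_cons] at h
        obtain ⟨rfl, h2⟩ := h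
        simp only [genAltLoop, canonLoop]
        apply ih
        rw [List.take_take]
        simp only [Nat.min_self]
        exact take_mergeB_congr fuel rest rest' _ _ h2 rfl

-- ===== VERDICT (by name: the statement is the Claim_ definition above) =====
theorem gen_spec : Claim_equal_gen := by
  intro n _
  unfold Spec_gen gen gen_alt
  rw [genLoop_eq_canon n.toNat [] _ _ [2, 3],
      genAltLoop_eq_canon n.toNat [] [2, 3] [2, 3] rfl]
  · refine ⟨?_, by decide, by decide, by simp, by simp, by simp, by simp⟩
    intro z
    rw [PySem.Set.mem_diff]
    simp [PySem.Set.ofList, PySem.Set.empty, PySem.Set.add]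
  · decide
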